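-- pv_equiv track=rewrite | github.com/gh-xj/zeroclaw | scripts/release/generate_release_report.py | order_main_report_sections
-- ===== SOURCE A (Python) =====
-- MAIN_REPORT_SECTION_ORDER = (
--     "Security",
--     "Channels & UX",
--     "Provider/Model stack",
--     "Tools & Agent behavior",
--     "Memory & Scheduling",
--     "CI/Release",
--     "Platform & Maintenance",
-- )
--
-- def order_main_report_sections(
--     grouped_changes: dict[str, list[dict[str, object]]],
-- ) -> list[str]:
--     ordered: list[str] = []
--     for section_name in MAIN_REPORT_SECTION_ORDER:
--         if grouped_changes.get(section_name):
--             ordered.append(section_name)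
--
--     ordered_set = set(ordered)
--     other_sections = [
--         (section_name, section_changes)
--         for section_name, section_changes in grouped_changes.items()
--         if section_name.startswith("Other:") and section_name not in ordered_set and section_changes
--     ]
--     other_sections.sort(key=lambda item: (-len(item[1]), item[0].lower()))
--     ordered.extend(section_name for section_name, _ in other_sections)
--     ordered_set.update(section_name for section_name, _ in other_sections)
--
--     remaining_sections = [
--         (section_name, section_changes)
--         for section_name, section_changes in grouped_changes.items()
--         if section_name not in ordered_set and section_changes
--     ]
--     remaining_sections.sort(key=lambda item: (-len(item[1]), item[0].lower()))
--     ordered.extend(section_name for section_name, _ in remaining_sections)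
--     return ordered
-- ===== SOURCE B (Python) =====
-- MAIN_REPORT_SECTION_ORDER = (
--     "Security",
--     "Channels & UX",
--     "Provider/Model stack",
--     "Tools & Agent behavior",
--     "Memory & Scheduling",
--     "CI/Release",
--     "Platform & Maintenance",
-- )
--
-- def order_main_report_sections(
--     grouped_changes: dict[str, list[dict[str, object]]],
-- ) -> list[str]:
--     # One classification pass over items() using a precomputed name->index map,
--     # then three keyed sorts; no dict probing and no mutable set bookkeeping.
--     index = {name: i for i, name in enumerate(MAIN_REPORT_SECTION_ORDER)}
--     priority: list[tuple[int, str]] = []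
--     other: list[tuple[str, list]] = []
--     remaining: list[tuple[str, list]] = []
--     for name, changes in grouped_changes.items():
--         if not changes:
--             continue
--         if name in index:
--             priority.append((index[name], name))
--         elif name.startswith("Other:"):
--             other.append((name, changes))
--         else:
--             remaining.append((name, changes))
--     priority.sort(key=lambda item: item[0])
--     other.sort(key=lambda item: (-len(item[1]), item[0].lower()))
--     remaining.sort(key=lambda item: (-len(item[1]), item[0].lower()))
--     return [name for _, name in priority] + [name for name, _ in other] + [name for name, _ in remaining]
-- ===== Notes on version B (the rewrite author's own statement) =====
-- stated objective: alternative
-- what changed: Replaces A's fixed-order dict probing plus two set-filtered comprehension+sort passes with a single classification pass over items() using a precomputed name->index map into three buckets, each sorted by its own key (the priority bucket is sorted by index instead of iterating the fixed tuple).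
import Mathlib
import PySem

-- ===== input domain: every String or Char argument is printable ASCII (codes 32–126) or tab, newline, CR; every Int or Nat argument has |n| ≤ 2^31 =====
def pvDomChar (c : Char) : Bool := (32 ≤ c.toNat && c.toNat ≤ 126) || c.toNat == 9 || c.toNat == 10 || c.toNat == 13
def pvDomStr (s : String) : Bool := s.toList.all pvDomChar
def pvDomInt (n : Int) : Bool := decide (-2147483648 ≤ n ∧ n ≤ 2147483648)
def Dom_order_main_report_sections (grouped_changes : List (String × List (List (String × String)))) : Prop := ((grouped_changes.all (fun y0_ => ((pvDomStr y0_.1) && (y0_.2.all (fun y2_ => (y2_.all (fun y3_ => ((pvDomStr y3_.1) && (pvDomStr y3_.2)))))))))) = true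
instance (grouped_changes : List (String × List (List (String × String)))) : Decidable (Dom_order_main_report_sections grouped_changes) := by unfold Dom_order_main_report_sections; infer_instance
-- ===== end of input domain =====

-- B replaces A's fixed-order dict probing plus two set-filtered comprehension+sort passes with one
-- classification pass over items() (via a precomputed name->index map) into three buckets, each
-- sorted by its own key; same asymptotic cost (objective: alternative). Return value only; no mutation.

def pvMainOrder : List String :=
  ["Security", "Channels & UX", "Provider/Model stack", "Tools & Agent behavior",
   "Memory & Scheduling", "CI/Release", "Platform & Maintenance"]

def pvKey1 (it : String × List (List (String × String))) : Int := -(PySem.List.len it.2)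
def pvKey2 (it : String × List (List (String × String))) : String := PySem.Str.lower it.1

-- ===== PORT A =====
def order_main_report_sections (grouped_changes : List (String × List (List (String × String)))) : List String :=
  let d := PySem.Dict.ofList grouped_changes
  let ordered := pvMainOrder.foldl
    (fun acc name => if !(d.getD name []).isEmpty then acc ++ [name] else acc) []
  let orderedSet := PySem.Set.ofList ordered
  let other := d.items.filter (fun it =>
    PySem.Str.startswith it.1 "Other:" && !(PySem.Set.contains orderedSet it.1) && !it.2.isEmpty)
  let otherS := PySem.List.sorted2 other pvKey1 pvKey2
  let ordered2 := ordered ++ otherS.map (·.1)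
  let orderedSet2 := PySem.Set.update orderedSet (otherS.map (·.1))
  let remaining := d.items.filter (fun it =>
    !(PySem.Set.contains orderedSet2 it.1) && !it.2.isEmpty)
  let remS := PySem.List.sorted2 remaining pvKey1 pvKey2
  ordered2 ++ remS.map (·.1)

-- ===== PORT B =====
def pvIndex : PySem.Dict String Int :=
  PySem.Dict.ofList ((PySem.List.enumerate pvMainOrder).map (fun p => (p.2, p.1)))

def pvClassify
    (acc : List (Int × String) × List (String × List (List (String × String))) × List (String × List (List (String × String))))
    (it : String × List (List (String × String))) :
    List (Int × String) × List (String × List (List (String × String))) × List (String × List (List (String × String))) :=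
  if it.2.isEmpty then acc
  else match pvIndex.get? it.1 with
    | some i => (acc.1 ++ [(i, it.1)], acc.2.1, acc.2.2)
    | none =>
      if PySem.Str.startswith it.1 "Other:" then (acc.1, acc.2.1 ++ [it], acc.2.2)
      else (acc.1, acc.2.1, acc.2.2 ++ [it])

def order_main_report_sections_alt (grouped_changes : List (String × List (List (String × String)))) : List String :=
  let t := (PySem.Dict.ofList grouped_changes).items.foldl pvClassify ([], [], [])
  (PySem.List.sorted t.1 (fun x => x.1)).map (·.2)
    ++ (PySem.List.sorted2 t.2.1 pvKey1 pvKey2).map (·.1)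
    ++ (PySem.List.sorted2 t.2.2 pvKey1 pvKey2).map (·.1)

-- ===== PRECONDITION & SPEC =====
def Spec_order_main_report_sections (grouped_changes : List (String × List (List (String × String)))) (out : List String) : Prop := out = order_main_report_sections_alt grouped_changes
instance (grouped_changes : List (String × List (List (String × String)))) (out : List String) : Decidable (Spec_order_main_report_sections grouped_changes out) := by unfold Spec_order_main_report_sections; infer_instance

-- ===== CLAIM (what is proved, stated in full; the proofs are below) =====
def Claim_equal_order_main_report_sections : Prop := ∀ (grouped_changes : List (String × List (List (String × String)))), Dom_order_main_report_sections grouped_changes → Spec_order_main_report_sections grouped_changes (order_main_report_sections grouped_changes)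

-- ===== LEMMAS AND PROOFS =====

def pvIOf (n : String) : Int := (pvIndex.get? n).getD 0

def pvP0 (it : String × List (List (String × String))) : Bool :=
  !it.2.isEmpty && (pvIndex.get? it.1).isSome
def pvP1 (it : String × List (List (String × String))) : Bool :=
  !it.2.isEmpty && (pvIndex.get? it.1).isNone && PySem.Str.startswith it.1 "Other:"
def pvP2 (it : String × List (List (String × String))) : Bool :=
  !it.2.isEmpty && (pvIndex.get? it.1).isNone && !PySem.Str.startswith it.1 "Other:"

lemma pvIndex_isSome (n : String) : (pvIndex.get? n).isSome = true ↔ n ∈ pvMainOrder := by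
  have hk : pvIndex.keys = pvMainOrder := by decide
  rw [← hk, ← PySem.Dict.contains_eq_isSome_get?, PySem.Dict.contains_iff_mem_keys]

lemma pvMainOrder_pairwise : pvMainOrder.Pairwise (fun a b => pvIOf a < pvIOf b) := by decide

lemma pvMainOrder_not_other : ∀ n ∈ pvMainOrder, PySem.Str.startswith n "Other:" = false := by decide

lemma pvIndex_none_of_other {n : String} (hS : PySem.Str.startswith n "Other:" = true) :
    pvIndex.get? n = none := by
  rw [← Option.not_isSome_iff_eq_none]
  intro h
  have := pvMainOrder_not_other n ((pvIndex_isSome n).mp (by simpa using h))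
  rw [hS] at this; cases this

lemma pvClassify_foldl (l : List (String × List (List (String × String))))
    (acc : List (Int × String) × List (String × List (List (String × String))) × List (String × List (List (String × String)))) :
    l.foldl pvClassify acc
      = (acc.1 ++ (l.filter pvP0).map (fun it => (pvIOf it.1, it.1)),
         acc.2.1 ++ l.filter pvP1,
         acc.2.2 ++ l.filter pvP2) := by
  induction l generalizing acc with
  | nil => simp
  | cons it l ih =>
    rw [List.foldl_cons, ih]
    by_cases hE : it.2.isEmpty
    · simp [pvClassify, pvP0, pvP1, pvP2, hE]
    · rcases hI : pvIndex.get? it.1 with _ | i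
      · by_cases hS : PySem.Str.startswith it.1 "Other:"
        · simp at hS; simp [pvClassify, pvP0, pvP1, pvP2, hE, hI, hS]
        · simp at hS; simp [pvClassify, pvP0, pvP1, pvP2, hE, hI, hS]
      · simp [pvClassify, pvP0, pvP1, pvP2, pvIOf, hE, hI]

lemma pv_names_perm (d : PySem.Dict String (List (List (String × String)))) (hnd : d.keys.Nodup) :
    (pvMainOrder.filter (fun n => !(d.getD n []).isEmpty)).Perm ((d.items.filter pvP0).map (·.1)) := by
  have hkeys : (d.items.map (·.1)).Nodup := by simpa [PySem.Dict.keys] using hnd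
  have nd2 : ((d.items.filter pvP0).map (·.1)).Nodup :=
    ((List.filter_sublist (l := d.items) (p := pvP0)).map (·.1)).nodup hkeys
  have nd1 : (pvMainOrder.filter (fun n => !(d.getD n []).isEmpty)).Nodup :=
    (by decide : pvMainOrder.Nodup).filter _
  rw [List.perm_ext_iff_of_nodup nd1 nd2]
  intro n
  simp only [List.mem_filter, List.mem_map]
  constructor
  · rintro ⟨hin, hP⟩
    rcases h : d.get? n with _ | cs
    · rw [PySem.Dict.getD_eq_get?_getD, h] at hP; simp at hP
    · refine ⟨(n, cs), ⟨PySem.Dict.mem_items_of_get?_eq_some d h, ?_⟩, rfl⟩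
      rw [PySem.Dict.getD_eq_get?_getD, h] at hP
      simp only [Option.getD_some] at hP
      simp [pvP0, hP, (pvIndex_isSome n).mpr hin]
  · rintro ⟨⟨n', cs⟩, ⟨hmem, hp0⟩, rfl⟩
    simp only [pvP0, Bool.and_eq_true] at hp0
    have hg := PySem.Dict.get?_of_mem_items d hmem hnd
    refine ⟨(pvIndex_isSome _).mp hp0.2, ?_⟩
    rw [PySem.Dict.getD_eq_get?_getD, hg]
    simpa using hp0.1

lemma pv_prio_eq (d : PySem.Dict String (List (List (String × String)))) (hnd : d.keys.Nodup) :
    (PySem.List.sorted ((d.items.filter pvP0).map (fun it => (pvIOf it.1, it.1))) (fun x => x.1)).map (·.2)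
      = pvMainOrder.filter (fun n => !(d.getD n []).isEmpty) := by
  have hmain : PySem.List.sorted ((d.items.filter pvP0).map (fun it => (pvIOf it.1, it.1))) (fun x => x.1)
      = (pvMainOrder.filter (fun n => !(d.getD n []).isEmpty)).map (fun n => (pvIOf n, n)) := by
    apply PySem.List.sorted_eq_of_perm_of_pairwise_lt
    · have h2 : (d.items.filter pvP0).map (fun it => (pvIOf it.1, it.1))
          = ((d.items.filter pvP0).map (·.1)).map (fun n => (pvIOf n, n)) := by
        rw [List.map_map]; rfl
      rw [h2]
      exact (pv_names_perm d hnd).map _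
    · rw [List.pairwise_map]
      exact pvMainOrder_pairwise.filter _
  rw [hmain, List.map_map]
  exact List.map_id' _

lemma pv_other_eq (d : PySem.Dict String (List (List (String × String)))) :
    d.items.filter (fun it =>
      PySem.Str.startswith it.1 "Other:" &&
      !(PySem.Set.contains (PySem.Set.ofList (pvMainOrder.filter (fun n => !(d.getD n []).isEmpty))) it.1) &&
      !it.2.isEmpty)
    = d.items.filter pvP1 := by
  apply List.filter_congr
  intro it _
  by_cases hS : PySem.Str.startswith it.1 "Other:" = true
  · have hni : it.1 ∉ pvMainOrder := by
      intro h
      have := pvMainOrder_not_other it.1 h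
      rw [hS] at this; cases this
    have hnone := pvIndex_none_of_other hS
    simp at hS
    simp [pvP1, hS, hnone, hni, Bool.and_comm]
  · simp at hS
    simp [pvP1, hS]

lemma pv_rem_eq (d : PySem.Dict String (List (List (String × String)))) (hnd : d.keys.Nodup) :
    d.items.filter (fun it =>
      !(PySem.Set.contains (PySem.Set.update
          (PySem.Set.ofList (pvMainOrder.filter (fun n => !(d.getD n []).isEmpty)))
          ((PySem.List.sorted2 (d.items.filter pvP1) pvKey1 pvKey2).map (·.1))) it.1) &&
      !it.2.isEmpty)
    = d.items.filter pvP2 := by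
  apply List.filter_congr
  intro it hmem
  by_cases hE : it.2.isEmpty
  · simp [pvP2, hE]
  · have hg : d.get? it.1 = some it.2 := PySem.Dict.get?_of_mem_items d (by simpa using hmem) hnd
    have hne : it.2 ≠ [] := by simpa using hE
    rcases hI : pvIndex.get? it.1 with _ | i
    · by_cases hS : PySem.Str.startswith it.1 "Other:" = true
      · simp at hS
        have hp1 : pvP1 it = true := by simp [pvP1, hE, hI, hS]
        simp [pvP2, hS]
        intro _ hfor
        exact absurd ((PySem.List.sorted2_perm (d.items.filter pvP1) pvKey1 pvKey2 false).mem_iff.mpr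
          (List.mem_filter.mpr ⟨hmem, hp1⟩)) (hfor it.2)
      · simp at hS
        simp [pvP2, hE, hI, hS]
        constructor
        · intro h1
          have := (pvIndex_isSome it.1).mpr h1
          rw [hI] at this; cases this
        · intro x hx
          have hx' := (List.mem_filter.mp
            ((PySem.List.sorted2_perm (d.items.filter pvP1) pvKey1 pvKey2 false).mem_iff.mp hx)).2
          simp [pvP1] at hx'
          rw [hx'.2] at hS; cases hS
    · have hin : it.1 ∈ pvMainOrder := (pvIndex_isSome it.1).mp (by simp [hI])
      simp [pvP2, hI]
      intro h1 _
      have := h1 hin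
      rwa [PySem.Dict.getD_eq_get?_getD, hg, Option.getD_some] at this

-- ===== VERDICT (by name: the statement is the Claim_ definition above) =====
theorem order_main_report_sections_spec : Claim_equal_order_main_report_sections := by
  intro gc _
  unfold Spec_order_main_report_sections
  simp only [order_main_report_sections, order_main_report_sections_alt]
  rw [PySem.List.foldl_append_if (p := fun name => !((PySem.Dict.ofList gc).getD name []).isEmpty) (f := fun n => n)]
  rw [pvClassify_foldl]
  simp only [List.nil_append, List.map_id']
  rw [pv_other_eq, pv_rem_eq _ (PySem.Dict.nodup_keys_ofList gc), pv_prio_eq _ (PySem.Dict.nodup_keys_ofList gc)]
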